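-- pv_equiv track=rewrite | github.com/andriitugai/leetcode-daily-challenges | from-1801-to-1900/1829-maximum-xor-for-each-query/solution.py | getMaximumXor
-- ===== SOURCE A (Python) =====
-- from typing import List
--
-- def getMaximumXor(nums: List[int], maximumBit: int) -> List[int]:
--     xor = 0
--     for n in nums:
--         xor ^= n
--
--     bitmask = (1 << maximumBit) - 1
--     result = []
--     for n in reversed(nums):
--         result.append(xor ^ bitmask)
--         xor ^= n
--
--     return result
-- ===== SOURCE B (Python) =====
-- from typing import List
--
-- def getMaximumXor(nums: List[int], maximumBit: int) -> List[int]: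
--     bitmask = (1 << maximumBit) - 1
--     prefix = [0]
--     for n in nums:
--         prefix.append(prefix[-1] ^ n)
--     return [prefix[j] ^ bitmask for j in range(len(nums), 0, -1)]
-- ===== Notes on version B (the rewrite author's own statement) =====
-- stated objective: alternative
-- what changed: B builds an explicit prefix-XOR table in a forward pass and then fills the answer by indexing into that table along a countdown range, instead of A's backward pass over reversed(nums) that threads a single running XOR accumulator updated in place.
import Mathlib
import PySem

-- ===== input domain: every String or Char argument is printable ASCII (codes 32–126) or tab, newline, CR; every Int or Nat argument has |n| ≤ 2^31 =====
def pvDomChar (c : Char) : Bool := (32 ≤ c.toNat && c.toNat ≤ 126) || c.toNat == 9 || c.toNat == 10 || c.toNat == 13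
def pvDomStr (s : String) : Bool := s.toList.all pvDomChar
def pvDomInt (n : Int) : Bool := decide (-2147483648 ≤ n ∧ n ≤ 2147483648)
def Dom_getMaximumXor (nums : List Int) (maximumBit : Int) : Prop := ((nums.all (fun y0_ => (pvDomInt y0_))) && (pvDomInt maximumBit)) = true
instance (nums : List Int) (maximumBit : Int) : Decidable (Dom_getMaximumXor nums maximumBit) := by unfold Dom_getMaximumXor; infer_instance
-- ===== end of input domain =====

-- B builds an explicit prefix-XOR table forward and indexes into it along a countdown
-- range, instead of A's backward pass threading one running XOR (objective: alternative).

-- ===== PORT A =====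
def getMaximumXor (nums : List Int) (maximumBit : Int) : List Int :=
  let xor := nums.foldl (fun x n => PySem.Int.bxor x n) 0
  -- (1 << maximumBit) - 1 ; Pre_ requires 0 ≤ maximumBit (Python raises ValueError below 0)
  let bitmask : Int := (1 <<< maximumBit.toNat) - 1
  let st := nums.reverse.foldl
    (fun (st : Int × List Int) n =>
      (PySem.Int.bxor st.1 n, st.2 ++ [PySem.Int.bxor st.1 bitmask]))
    (xor, ([] : List Int))
  st.2

-- ===== PORT B =====
def getMaximumXor_alt (nums : List Int) (maximumBit : Int) : List Int :=
  let bitmask : Int := (1 <<< maximumBit.toNat) - 1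
  -- prefix = [0]; for n in nums: prefix.append(prefix[-1] ^ n)
  let pfx := nums.foldl
    (fun (p : List Int) n => p ++ [PySem.Int.bxor (PySem.List.pyGetD p (-1) 0) n])
    ([0] : List Int)
  -- [prefix[j] ^ bitmask for j in range(len(nums), 0, -1)]  (j always in range, so pyGetD is exact)
  (PySem.List.pyRange (nums.length : Int) 0 (-1)).map
    (fun j => PySem.Int.bxor (PySem.List.pyGetD pfx j 0) bitmask)

-- ===== PRECONDITION & SPEC =====
-- Pre_ excludes negative maximumBit, on which Python's '1 << maximumBit' raises ValueError.
def Pre_getMaximumXor (nums : List Int) (maximumBit : Int) : Prop := 0 ≤ maximumBit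
instance (nums : List Int) (maximumBit : Int) : Decidable (Pre_getMaximumXor nums maximumBit) := by unfold Pre_getMaximumXor; infer_instance
def pvWitness_getMaximumXor : List Int × Int := ([0, 1, 1, 3], 2)

def Spec_getMaximumXor (nums : List Int) (maximumBit : Int) (out : List Int) : Prop := out = getMaximumXor_alt nums maximumBit
instance (nums : List Int) (maximumBit : Int) (out : List Int) : Decidable (Spec_getMaximumXor nums maximumBit out) := by unfold Spec_getMaximumXor; infer_instance

-- ===== CLAIM =====
def Claim_equal_getMaximumXor : Prop := ∀ (nums : List Int) (maximumBit : Int), Dom_getMaximumXor nums maximumBit → Pre_getMaximumXor nums maximumBit → Spec_getMaximumXor nums maximumBit (getMaximumXor nums maximumBit)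

-- ===== LEMMAS AND PROOFS =====

theorem pv_bxor_eq_xor (a b : Int) : PySem.Int.bxor a b = Int.xor a b := by
  rcases a with m | m <;> rcases b with n | n <;>
    simp [PySem.Int.bxor, Int.xor, Int.negSucc_eq] <;> omega

theorem pv_xor_cancel (a b : Int) : Int.xor (Int.xor a b) b = a := by
  rcases a with m | m <;> rcases b with n | n <;>
    simp [Int.xor]

theorem pv_bxor_cancel (a b : Int) : PySem.Int.bxor (PySem.Int.bxor a b) b = a := by
  simp [pv_bxor_eq_xor, pv_xor_cancel]

-- the list A's backward loop produces, starting from running xor x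
def pvG (bm : Int) : Int → List Int → List Int
  | _, [] => []
  | x, n :: t => PySem.Int.bxor x bm :: pvG bm (PySem.Int.bxor x n) t

-- the tail of B's prefix table, starting from running xor x
def pvG' : Int → List Int → List Int
  | _, [] => []
  | x, n :: t => PySem.Int.bxor x n :: pvG' (PySem.Int.bxor x n) t

theorem pv_loopA (bm : Int) (l : List Int) : ∀ (x : Int) (r : List Int),
    (l.foldl (fun (st : Int × List Int) n =>
      (PySem.Int.bxor st.1 n, st.2 ++ [PySem.Int.bxor st.1 bm])) (x, r)).2
    = r ++ pvG bm x l := by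
  induction l with
  | nil => simp [pvG]
  | cons n t ih => intro x r; simp [List.foldl, pvG, ih]

-- B's prefix-table loop: appending to a table whose last entry is the running xor
theorem pv_loopB (l : List Int) : ∀ (acc : List Int) (x : Int),
    (l.foldl (fun (p : List Int) n => p ++ [PySem.Int.bxor (PySem.List.pyGetD p (-1) 0) n])
      (acc ++ [x]))
    = acc ++ [x] ++ pvG' x l := by
  induction l with
  | nil => simp [pvG']
  | cons n t ih =>
    intro acc x
    simp only [List.foldl_cons, PySem.List.pyGetD_neg_one_append_singleton]
    rw [List.append_assoc acc [x] [PySem.Int.bxor x n], ← List.singleton_append,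
      ← List.append_assoc acc, ih]
    simp [pvG']

theorem pvG'_length (l : List Int) : ∀ x, (pvG' x l).length = l.length := by
  induction l with
  | nil => simp [pvG']
  | cons n t ih => intro x; simp [pvG', ih]

theorem pvG'_concat (y : Int) (l : List Int) : ∀ (x : Int),
    pvG' x (l ++ [y]) = pvG' x l ++ [PySem.Int.bxor (l.foldl PySem.Int.bxor x) y] := by
  induction l with
  | nil => intro x; simp [pvG']
  | cons n t ih => intro x; simp [pvG', ih, List.foldl]

theorem pv_main (bm : Int) (l : List Int) (x0 : Int) :
    pvG bm (l.foldl PySem.Int.bxor x0) l.reverse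
      = (pvG' x0 l).reverse.map (fun p => PySem.Int.bxor p bm) := by
  induction l using List.reverseRecOn with
  | nil => simp [pvG, pvG']
  | append_singleton ys y ih =>
    rw [List.foldl_append, List.reverse_append]
    simp only [List.foldl, List.reverse_singleton, List.singleton_append]
    rw [pvG, pv_bxor_cancel, ih, pvG'_concat]
    simp

-- ===== VERDICT =====
theorem getMaximumXor_spec : Claim_equal_getMaximumXor := by
  intro nums maximumBit _ _
  unfold Spec_getMaximumXor getMaximumXor getMaximumXor_alt
  simp only []
  set bm : Int := (1 <<< maximumBit.toNat) - 1 with hbm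
  -- A's side
  rw [show (nums.foldl (fun x n => PySem.Int.bxor x n) 0) = nums.foldl PySem.Int.bxor 0 from rfl,
    pv_loopA, List.nil_append, pv_main]
  -- B's side: the prefix table is 0 :: pvG' 0 nums
  rw [show ([0] : List Int) = [] ++ [0] from rfl, pv_loopB, List.nil_append]
  -- countdown range becomes a reversed ascending range
  rw [PySem.List.pyRange_neg_one_eq_reverse, List.map_reverse]
  simp only [List.singleton_append]
  norm_num
  have hlen2 : ((nums.length : Int) + 1) = (((0 :: pvG' 0 nums : List Int)).length : Int) := by
    simp [pvG'_length]
  rw [hlen2]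
  rw [show (fun j => PySem.Int.bxor (PySem.List.pyGetD (0 :: pvG' 0 nums) j 0) bm)
        = (fun p => PySem.Int.bxor p bm) ∘ (fun j => PySem.List.pyGetD (0 :: pvG' 0 nums) j 0)
      from rfl,
    ← List.map_map, PySem.List.map_pyGetD_pyRange' _ _ (by omega)]
  simp
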